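-- pv_equiv track=rewrite | github.com/matthewnbrown/roc-cluster | api/job_manager.py | _summarize_become_officer_results
-- ===== SOURCE A (Python) =====
-- from typing import List, Dict, Any, Optional
--
-- def _summarize_become_officer_results(successful_results: List[Dict]) -> Dict[str, Any]:
--     """Summarize become officer action results"""
--     summary = {
--         "officer_applications": 0,
--         "applications_successful": 0,
--         "applications_failed": 0,
--         "total_retries": 0
--     }
--
--     for result in successful_results:
--         result_data = result.get("result", {})
--         if isinstance(result_data, dict):
--             summary["officer_applications"] += 1
--             summary["total_retries"] += result_data.get("retries", 0)
--             if result_data.get("success"):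
--                 summary["applications_successful"] += 1
--             else:
--                 summary["applications_failed"] += 1
--
--     return summary
-- ===== SOURCE B (Python) =====
-- def _summarize_become_officer_results(successful_results):
--     """Summarize become officer action results (divide-and-conquer over index ranges)."""
--     def combine(a, b):
--         return (a[0] + b[0], a[1] + b[1], a[2] + b[2], a[3] + b[3])
--
--     def go(lo, hi):
--         # (applications, successful, failed, retries) for successful_results[lo:hi]
--         if hi <= lo:
--             return (0, 0, 0, 0)
--         if hi == lo + 1:
--             d = successful_results[lo].get("result", {})
--             if not isinstance(d, dict):
--                 return (0, 0, 0, 0)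
--             s = 1 if d.get("success") else 0
--             return (1, s, 1 - s, d.get("retries", 0))
--         mid = (lo + hi) // 2
--         return combine(go(lo, mid), go(mid, hi))
--
--     n, s, f, r = go(0, len(successful_results))
--     return {
--         "officer_applications": n,
--         "applications_successful": s,
--         "applications_failed": f,
--         "total_retries": r,
--     }
-- ===== Notes on version B (the rewrite author's own statement) =====
-- stated objective: alternative
-- what changed: Replaces A's fused sequential loop mutating a 4-counter summary dict with a divide-and-conquer recursion over index ranges: each half yields an (applications, successful, failed, retries) tuple and halves are merged by componentwise addition.
import Mathlib
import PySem

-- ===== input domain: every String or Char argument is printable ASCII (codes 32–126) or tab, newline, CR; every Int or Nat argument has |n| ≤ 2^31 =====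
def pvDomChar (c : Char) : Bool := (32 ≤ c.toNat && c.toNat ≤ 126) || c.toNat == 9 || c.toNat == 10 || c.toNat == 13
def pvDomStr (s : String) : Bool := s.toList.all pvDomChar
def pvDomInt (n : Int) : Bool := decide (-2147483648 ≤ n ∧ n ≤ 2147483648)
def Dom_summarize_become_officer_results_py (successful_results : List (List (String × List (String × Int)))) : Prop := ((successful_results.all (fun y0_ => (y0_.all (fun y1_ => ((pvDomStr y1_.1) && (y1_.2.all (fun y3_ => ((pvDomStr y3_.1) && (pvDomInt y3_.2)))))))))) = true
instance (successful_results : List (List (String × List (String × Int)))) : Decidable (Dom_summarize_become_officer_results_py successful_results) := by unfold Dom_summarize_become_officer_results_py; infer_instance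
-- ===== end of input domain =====

-- B replaces A's fused counter-dict loop with a divide-and-conquer recursion over index
-- ranges, merging per-half summary tuples by componentwise addition (objective: alternative).

-- ===== PORT A =====
-- A: one loop mutating a 4-entry summary dict in place.
def summarize_become_officer_results_py (successful_results : List (List (String × List (String × Int)))) : List (String × Int) :=
  let summary : PySem.Dict String Int :=
    PySem.Dict.ofList [("officer_applications", 0), ("applications_successful", 0),
                       ("applications_failed", 0), ("total_retries", 0)]
  let final := successful_results.foldl (fun summary result =>
    -- result.get("result", {}): association-list lookup, first match
    let result_data := (List.lookup "result" result).getD []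
    -- isinstance(result_data, dict) is always true under the typed domain (value type is a dict)
    let summary := summary.modify "officer_applications" 0 (· + 1)
    let summary := summary.modify "total_retries" 0 (· + (List.lookup "retries" result_data).getD 0)
    if (List.lookup "success" result_data).getD 0 ≠ 0 then
      summary.modify "applications_successful" 0 (· + 1)
    else
      summary.modify "applications_failed" 0 (· + 1)) summary
  final.items

-- ===== PORT B =====
-- B helper: the (applications, successful, failed, retries) tuple for one element
def pvLeaf (r : List (String × List (String × Int))) : Int × Int × Int × Int :=
  -- d = successful_results[lo].get("result", {}); isinstance(d, dict) is always true
  -- under the typed domain (value type is a dict)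
  let d := (List.lookup "result" r).getD []
  let s : Int := if (List.lookup "success" d).getD 0 ≠ 0 then 1 else 0
  (1, s, 1 - s, (List.lookup "retries" d).getD 0)

-- B helper: componentwise addition of two summary tuples
def pvCombine (a b : Int × Int × Int × Int) : Int × Int × Int × Int :=
  (a.1 + b.1, a.2.1 + b.2.1, a.2.2.1 + b.2.2.1, a.2.2.2 + b.2.2.2)

-- B helper: divide-and-conquer over the index range [lo, hi); fuel ≥ hi - lo at every
-- call (a totality guard only: the 0-fuel branch is never reached from the wrapper)
def pvGo (xs : List (List (String × List (String × Int)))) : Nat → Nat → Nat → Int × Int × Int × Int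
  | 0, _, _ => (0, 0, 0, 0)
  | fuel + 1, lo, hi =>
    if hi ≤ lo then (0, 0, 0, 0)
    else if hi = lo + 1 then pvLeaf ((xs[lo]?).getD [])
    else
      let mid := (lo + hi) / 2
      pvCombine (pvGo xs fuel lo mid) (pvGo xs fuel mid hi)

-- B: summarize by divide and conquer, then assemble the result dict
def summarize_become_officer_results_py_alt (successful_results : List (List (String × List (String × Int)))) : List (String × Int) :=
  let t := pvGo successful_results successful_results.length 0 successful_results.length
  [("officer_applications", t.1), ("applications_successful", t.2.1),
   ("applications_failed", t.2.2.1), ("total_retries", t.2.2.2)]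

-- ===== PRECONDITION & SPEC =====
def Spec_summarize_become_officer_results_py (successful_results : List (List (String × List (String × Int)))) (out : List (String × Int)) : Prop := out = summarize_become_officer_results_py_alt successful_results
instance (successful_results : List (List (String × List (String × Int)))) (out : List (String × Int)) : Decidable (Spec_summarize_become_officer_results_py successful_results out) := by unfold Spec_summarize_become_officer_results_py; infer_instance

-- ===== CLAIM (what is proved, stated in full; the proofs are below) =====
def Claim_equal_summarize_become_officer_results_py : Prop := ∀ (successful_results : List (List (String × List (String × Int)))), Dom_summarize_become_officer_results_py successful_results → Spec_summarize_become_officer_results_py successful_results (summarize_become_officer_results_py successful_results)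

-- ===== LEMMAS AND PROOFS =====

-- truthiness of result_data.get("success") for one input row
def pvSucc (r : List (String × List (String × Int))) : Bool :=
  (List.lookup "success" ((List.lookup "result" r).getD [])).getD 0 != 0

-- result_data.get("retries", 0) for one input row
def pvRet (r : List (String × List (String × Int))) : Int :=
  (List.lookup "retries" ((List.lookup "result" r).getD [])).getD 0

-- the intended aggregate of a block of rows
def pvAgg (ys : List (List (String × List (String × Int)))) : Int × Int × Int × Int :=
  ((ys.length : Int), (ys.countP pvSucc : Int),
   (ys.length : Int) - (ys.countP pvSucc : Int), (ys.map pvRet).sum)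

lemma pvAgg_append (a b : List (List (String × List (String × Int)))) :
    pvAgg (a ++ b) = pvCombine (pvAgg a) (pvAgg b) := by
  simp only [pvAgg, pvCombine, List.length_append, List.countP_append, List.map_append,
    List.sum_append, Prod.mk.injEq]
  and_intros <;> first | trivial | (push_cast; ring)

lemma pvGo_eq (xs : List (List (String × List (String × Int)))) (n : Nat) :
    ∀ lo hi, hi - lo ≤ n → hi ≤ xs.length →
      pvGo xs n lo hi = pvAgg ((xs.drop lo).take (hi - lo)) := by
  induction n with
  | zero =>
    intro lo hi h _
    rw [pvGo]
    have : hi - lo = 0 := by omega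
    simp [this, pvAgg]
  | succ n ih =>
    intro lo hi h hlen
    rw [pvGo]
    by_cases h1 : hi ≤ lo
    · rw [if_pos h1]
      have : hi - lo = 0 := by omega
      simp [this, pvAgg]
    · rw [if_neg h1]
      by_cases h2 : hi = lo + 1
      · rw [if_pos h2]
        have hlo : lo < xs.length := by omega
        have hd : xs.drop lo = xs[lo] :: xs.drop (lo + 1) := List.drop_eq_getElem_cons hlo
        have h3 : hi - lo = 1 := by omega
        rw [h3, hd]
        simp only [List.take_succ_cons, List.take_zero]
        simp [pvLeaf, pvAgg, pvSucc, pvRet, List.getElem?_eq_getElem hlo, bne_iff_ne]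
      · rw [if_neg h2]
        have hm1 : lo < (lo + hi) / 2 := by omega
        have hm2 : (lo + hi) / 2 < hi := by omega
        show pvCombine (pvGo xs n lo ((lo + hi) / 2)) (pvGo xs n ((lo + hi) / 2) hi) =
          pvAgg (List.take (hi - lo) (List.drop lo xs))
        have hsub : (List.drop lo xs).drop ((lo + hi) / 2 - lo) = List.drop ((lo + hi) / 2) xs := by
          rw [List.drop_drop]; congr 1; omega
        have htake : List.take (hi - lo) (List.drop lo xs)
            = List.take ((lo + hi) / 2 - lo) (List.drop lo xs)
              ++ List.take (hi - (lo + hi) / 2) (List.drop ((lo + hi) / 2) xs) := by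
          rw [show hi - lo = ((lo + hi) / 2 - lo) + (hi - (lo + hi) / 2) from by omega,
            List.take_add, hsub]
        rw [ih lo ((lo + hi) / 2) (by omega) (by omega),
            ih ((lo + hi) / 2) hi (by omega) hlen, htake, pvAgg_append]

-- invariant of A's loop: the summary dict stays a 4-entry literal whose values accumulate
lemma foldA (xs : List (List (String × List (String × Int)))) :
    ∀ (a s f t : Int),
    xs.foldl (fun summary result =>
      let result_data := (List.lookup "result" result).getD []
      let summary := summary.modify "officer_applications" 0 (· + 1)
      let summary := summary.modify "total_retries" 0 (· + (List.lookup "retries" result_data).getD 0)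
      if (List.lookup "success" result_data).getD 0 ≠ 0 then
        summary.modify "applications_successful" 0 (· + 1)
      else
        summary.modify "applications_failed" 0 (· + 1))
      (PySem.Dict.mk [("officer_applications", a), ("applications_successful", s),
                      ("applications_failed", f), ("total_retries", t)]) =
    PySem.Dict.mk [("officer_applications", a + xs.length),
                   ("applications_successful", s + (xs.countP pvSucc : Int)),
                   ("applications_failed", f + ((xs.length : Int) - (xs.countP pvSucc : Int))),
                   ("total_retries", t + (xs.map pvRet).sum)] := by
  induction xs with
  | nil => intro a s f t; simp
  | cons x xs ih =>
    intro a s f t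
    rw [List.foldl_cons]
    by_cases h : (List.lookup "success" ((List.lookup "result" x).getD [])).getD 0 ≠ 0
    · have hx : pvSucc x = true := by simpa [pvSucc] using h
      rw [if_pos h,
        show ((PySem.Dict.mk [("officer_applications", a), ("applications_successful", s),
            ("applications_failed", f), ("total_retries", t)]).modify "officer_applications" 0 (· + 1)
            |>.modify "total_retries" 0 (· + (List.lookup "retries" ((List.lookup "result" x).getD [])).getD 0)
            |>.modify "applications_successful" 0 (· + 1)) =
          PySem.Dict.mk [("officer_applications", a + 1), ("applications_successful", s + 1),
            ("applications_failed", f), ("total_retries", t + pvRet x)] from by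
          simp [PySem.Dict.modify, PySem.Dict.insert, PySem.Dict.getD, PySem.Dict.get?,
                PySem.Dict.contains, pvRet],
        ih]
      simp only [PySem.Dict.mk.injEq, List.cons.injEq, Prod.mk.injEq, List.countP_cons,
        List.length_cons, List.map_cons, List.sum_cons, hx]
      and_intros <;> first | trivial | (push_cast; ring)
    · have hx : pvSucc x = false := by simpa [pvSucc] using h
      rw [if_neg h,
        show ((PySem.Dict.mk [("officer_applications", a), ("applications_successful", s),
            ("applications_failed", f), ("total_retries", t)]).modify "officer_applications" 0 (· + 1)
            |>.modify "total_retries" 0 (· + (List.lookup "retries" ((List.lookup "result" x).getD [])).getD 0)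
            |>.modify "applications_failed" 0 (· + 1)) =
          PySem.Dict.mk [("officer_applications", a + 1), ("applications_successful", s),
            ("applications_failed", f + 1), ("total_retries", t + pvRet x)] from by
          simp [PySem.Dict.modify, PySem.Dict.insert, PySem.Dict.getD, PySem.Dict.get?,
                PySem.Dict.contains, pvRet],
        ih]
      simp only [PySem.Dict.mk.injEq, List.cons.injEq, Prod.mk.injEq, List.countP_cons,
        List.length_cons, List.map_cons, List.sum_cons, hx]
      and_intros <;> first | trivial | (push_cast; ring)

-- ===== VERDICT (by name: the statement is the Claim_ definition above) =====
theorem summarize_become_officer_results_py_spec : Claim_equal_summarize_become_officer_results_py := by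
  intro xs _
  unfold Spec_summarize_become_officer_results_py
  unfold summarize_become_officer_results_py summarize_become_officer_results_py_alt
  have h0 : PySem.Dict.ofList [("officer_applications", (0:Int)), ("applications_successful", 0),
      ("applications_failed", 0), ("total_retries", 0)] =
      PySem.Dict.mk [("officer_applications", 0), ("applications_successful", 0),
      ("applications_failed", 0), ("total_retries", 0)] := by decide
  have hb : pvGo xs xs.length 0 xs.length = pvAgg xs := by
    rw [pvGo_eq xs xs.length 0 xs.length (by omega) le_rfl]
    simp
  simp only [h0, foldA, hb, pvAgg]
  simp
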